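-- pv_equiv track=rewrite | github.com/jackerlidzs/check_verify | fix_initials.py | fix_firstname
-- ===== SOURCE A (Python) =====
-- def fix_firstname(firstname: str) -> str:
--     """Remove leading initials, keep the full name part."""
--     if not firstname:
--         return ""
--
--     parts = firstname.strip().split()
--
--     if not parts:
--         return ""
--
--     # Find the first full name (3+ chars, not a suffix)
--     suffixes = {'JR', 'SR', 'II', 'III', 'IV', 'V'}
--
--     result_parts = []
--     found_real_name = False
--
--     for part in parts:
--         # Skip suffixes
--         if part in suffixes:
--             continue
--
--         # If it's a real name (3+ chars)
--         if len(part) >= 3: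
--             found_real_name = True
--             result_parts.append(part)
--         elif found_real_name:
--             # Keep initials after a real name (middle initials)
--             result_parts.append(part)
--         # Skip initials before the first real name
--
--     return " ".join(result_parts)
-- ===== SOURCE B (Python) =====
-- def fix_firstname(firstname: str) -> str:
--     """Remove leading initials, keep the full name part."""
--     suffixes = {'JR', 'SR', 'II', 'III', 'IV', 'V'}
--     parts = firstname.strip().split()
--     # Drop leading junk until the first real name (3+ chars, not a suffix) ...
--     while parts:
--         head = parts[0]
--         if head not in suffixes and len(head) >= 3:
--             # ... then keep everything from there on, minus suffixes.
--             return " ".join(w for w in parts if w not in suffixes)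
--         parts = parts[1:]
--     return ""
-- ===== Notes on version B (the rewrite author's own statement) =====
-- stated objective: simpler
-- what changed: Replaces A's found_real_name flag loop with an accumulator by a locate-then-filter structure: drop leading words until the first real name (3+ chars, not a suffix), then join the remaining words with suffixes filtered out.
import Mathlib
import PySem

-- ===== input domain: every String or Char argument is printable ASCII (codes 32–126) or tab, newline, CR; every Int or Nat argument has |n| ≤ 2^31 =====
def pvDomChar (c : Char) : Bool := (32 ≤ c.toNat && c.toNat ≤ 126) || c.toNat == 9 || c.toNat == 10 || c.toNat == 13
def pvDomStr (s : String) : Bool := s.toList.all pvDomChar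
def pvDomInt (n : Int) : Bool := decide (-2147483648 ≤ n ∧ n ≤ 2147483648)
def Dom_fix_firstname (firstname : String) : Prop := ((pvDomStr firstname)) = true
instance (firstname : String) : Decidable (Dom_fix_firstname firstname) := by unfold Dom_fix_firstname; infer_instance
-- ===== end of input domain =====

-- B replaces A's found_real_name flag loop by: scan to the first real name (3+ chars, not a
-- suffix), then join the remaining words with suffixes filtered out (objective: simpler).

-- shared literal: the suffix set {'JR','SR','II','III','IV','V'} and Python's 'part in suffixes'
def pvIsSuffix (p : String) : Bool :=
  PySem.Set.contains (PySem.Set.ofList ["JR", "SR", "II", "III", "IV", "V"]) p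

-- ===== PORT A =====
-- one iteration of A's for-loop over state (result_parts, found_real_name)
def fixAStep (st : List String × Bool) (part : String) : List String × Bool :=
  if pvIsSuffix part then st
  else if 3 ≤ PySem.Str.len part then (st.1 ++ [part], true)
  else if st.2 then (st.1 ++ [part], st.2)
  else st

def fix_firstname (firstname : String) : String :=
  if firstname == "" then ""
  else
    let parts := PySem.Str.split₀ (PySem.Str.strip firstname)
    if parts == [] then ""
    else
      let res := parts.foldl fixAStep ([], false)
      PySem.Str.join " " res.1

-- ===== PORT B =====
-- B's while-loop: drop leading junk until a real name, then join the tail minus suffixes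
def fixAltGo : List String → String
  | [] => ""
  | head :: rest =>
      if !pvIsSuffix head && 3 ≤ PySem.Str.len head then
        PySem.Str.join " " ((head :: rest).filter (fun w => !pvIsSuffix w))
      else fixAltGo rest

def fix_firstname_alt (firstname : String) : String :=
  fixAltGo (PySem.Str.split₀ (PySem.Str.strip firstname))

-- ===== PRECONDITION & SPEC =====
def Spec_fix_firstname (firstname : String) (out : String) : Prop := out = fix_firstname_alt firstname
instance (firstname : String) (out : String) : Decidable (Spec_fix_firstname firstname out) := by unfold Spec_fix_firstname; infer_instance

-- ===== CLAIM (what is proved, stated in full; the proofs are below) =====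
def Claim_equal_fix_firstname : Prop := ∀ (firstname : String), Dom_fix_firstname firstname → Spec_fix_firstname firstname (fix_firstname firstname)

-- ===== LEMMAS AND PROOFS =====

-- list of words B keeps, as a pure list function (fixAltGo = join " " ∘ fixAltKeep)
def fixAltKeep : List String → List String
  | [] => []
  | head :: rest =>
      if !pvIsSuffix head && 3 ≤ PySem.Str.len head then
        (head :: rest).filter (fun w => !pvIsSuffix w)
      else fixAltKeep rest

theorem fixAltGo_eq_join (parts : List String) :
    fixAltGo parts = PySem.Str.join " " (fixAltKeep parts) := by
  induction parts with
  | nil => rfl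
  | cons h t ih =>
    simp only [fixAltGo, fixAltKeep]
    split_ifs <;> simp [ih]

theorem foldl_fixAStep_true (parts : List String) (acc : List String) :
    (parts.foldl fixAStep (acc, true)).1 = acc ++ parts.filter (fun w => !pvIsSuffix w) := by
  induction parts generalizing acc with
  | nil => simp
  | cons h t ih =>
    simp only [List.foldl_cons, fixAStep, List.filter_cons]
    by_cases hs : pvIsSuffix h
    · simp [hs, ih]
    · by_cases hl : 3 ≤ h.length <;> simp [hs, hl, ih]

theorem foldl_fixAStep_false (parts : List String) (acc : List String) :
    (parts.foldl fixAStep (acc, false)).1 = acc ++ fixAltKeep parts := by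
  induction parts generalizing acc with
  | nil => simp [fixAltKeep]
  | cons h t ih =>
    simp only [List.foldl_cons, fixAStep, fixAltKeep]
    by_cases hs : pvIsSuffix h
    · simp [hs, ih]
    · by_cases hl : 3 ≤ h.length
      · simp [hs, hl, foldl_fixAStep_true]
      · simp [hs, hl, ih]

-- ===== VERDICT (by name: the statement is the Claim_ definition above) =====
theorem fix_firstname_spec : Claim_equal_fix_firstname := by
  intro firstname _
  unfold Spec_fix_firstname fix_firstname fix_firstname_alt
  by_cases h0 : firstname == ""
  · simp only [h0, if_true]
    have : firstname = "" := by simpa using h0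
    subst this
    rfl
  · simp only [h0]
    rw [fixAltGo_eq_join]
    by_cases hp : PySem.Str.split₀ (PySem.Str.strip firstname) == []
    · have : PySem.Str.split₀ (PySem.Str.strip firstname) = [] := by simpa using hp
      simp [this, fixAltKeep]
      rfl
    · simp only [hp]
      rw [foldl_fixAStep_false]
      simp
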